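-- pv_equiv track=rewrite | github.com/chriswlai/av-perception-trace | src/trace_protocol/render_explanation.py | _summarize_targets
-- ===== SOURCE A (Python) =====
-- from collections import Counter
-- from typing import List
--
-- def _summarize_targets(targets: List[str]) -> str:
--     if not targets:
--         return ""
--     counts = Counter(targets)
--     parts = []
--     for label, count in counts.items():
--         if count == 1:
--             parts.append(label)
--         else:
--             parts.append(f"{label} ({count})")
--     return ", ".join(parts)
-- ===== SOURCE B (Python) =====
-- from typing import List
--
-- def _summarize_targets(targets: List[str]) -> str:
--     # Group-and-shrink: repeatedly peel off the first remaining label,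
--     # derive its count from how much removing it shrinks the worklist,
--     # and continue on the shrunken worklist.
--     parts = []
--     work = list(targets)
--     while work:
--         label = work[0]
--         rest = [t for t in work[1:] if t != label]
--         count = len(work) - len(rest)
--         parts.append(label if count == 1 else f"{label} ({count})")
--         work = rest
--     return ", ".join(parts)
-- ===== Notes on version B (the rewrite author's own statement) =====
-- stated objective: alternative
-- what changed: Replaces the one-pass Counter aggregation with a group-and-shrink worklist loop: peel the first remaining label, derive its count from how much filtering it out shrinks the worklist, and continue on the shrunken worklist.
import Mathlib
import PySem

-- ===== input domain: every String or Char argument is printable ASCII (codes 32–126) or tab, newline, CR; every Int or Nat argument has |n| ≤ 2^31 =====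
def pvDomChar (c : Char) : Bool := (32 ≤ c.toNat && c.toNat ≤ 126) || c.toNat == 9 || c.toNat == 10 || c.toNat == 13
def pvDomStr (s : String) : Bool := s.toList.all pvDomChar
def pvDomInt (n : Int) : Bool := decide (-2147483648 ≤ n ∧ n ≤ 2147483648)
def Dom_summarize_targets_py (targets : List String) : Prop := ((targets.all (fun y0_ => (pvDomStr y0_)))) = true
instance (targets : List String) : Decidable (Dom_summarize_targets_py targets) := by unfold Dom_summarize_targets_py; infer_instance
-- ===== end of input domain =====

-- B replaces the one-pass Counter loop by a group-and-shrink worklist loop (peel the first label, count by list shrinkage, continue on the shrunken worklist); same return value, no side effects.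

-- ===== PORT A =====
def summarize_targets_py (targets : List String) : String :=
  if targets = [] then ""
  else
    let counts : PySem.Dict String Int := PySem.Dict.counter targets
    let parts : List String :=
      counts.items.foldl
        (fun ps lc =>
          if lc.2 == 1 then ps ++ [lc.1]
          else ps ++ [lc.1 ++ " (" ++ PySem.Int.toStr lc.2 ++ ")"]) []
    PySem.Str.join ", " parts

-- ===== PORT B =====
-- the while loop: emit one part per round, shrink the worklist, until it is empty
def altParts : List String → List String
  | [] => []
  | label :: tl =>
    let rest := tl.filter (fun t => t ≠ label)
    let count : Int := ((label :: tl).length : Int) - (rest.length : Int)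
    (if count == 1 then label
     else label ++ " (" ++ PySem.Int.toStr count ++ ")") :: altParts rest
termination_by work => work.length
decreasing_by
  simp only [List.length_cons, List.length_unattach]
  refine Nat.lt_succ_of_le (le_trans (List.length_filter_le _ _) ?_)
  simp [List.length_attach]

def summarize_targets_py_alt (targets : List String) : String :=
  PySem.Str.join ", " (altParts targets)

-- ===== PRECONDITION & SPEC =====
def Spec_summarize_targets_py (targets : List String) (out : String) : Prop := out = summarize_targets_py_alt targets
instance (targets : List String) (out : String) : Decidable (Spec_summarize_targets_py targets out) := by unfold Spec_summarize_targets_py; infer_instance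

-- ===== CLAIM (what is proved, stated in full; the proofs are below) =====
def Claim_equal_summarize_targets_py : Prop := ∀ (targets : List String), Dom_summarize_targets_py targets → Spec_summarize_targets_py targets (summarize_targets_py targets)

-- ===== LEMMAS AND PROOFS =====

-- the formatted part for label k, with its count taken in `targets`
def fmtPart (targets : List String) (k : String) : String :=
  if ((targets.count k : Int)) == 1 then k
  else k ++ " (" ++ PySem.Int.toStr (targets.count k) ++ ")"

theorem foldl_append_map {α β : Type} (g : α → β) :
    ∀ (xs : List α) (acc : List β),
      xs.foldl (fun ps x => ps ++ [g x]) acc = acc ++ xs.map g := by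
  intro xs
  induction xs with
  | nil => simp
  | cons x xs ih => intro acc; simp [ih]

-- A's parts list is fmtPart mapped over the first-occurrence-ordered labels
theorem partsA_eq (targets : List String) :
    (PySem.Dict.counter targets).items.foldl
        (fun ps (lc : String × Int) =>
          if lc.2 == 1 then ps ++ [lc.1]
          else ps ++ [lc.1 ++ " (" ++ PySem.Int.toStr lc.2 ++ ")"]) []
      = (PySem.Set.ofList targets).map (fmtPart targets) := by
  rw [PySem.Dict.items_counter, List.foldl_map]
  have h := foldl_append_map (fun k => fmtPart targets k)
      (PySem.Set.ofList targets) []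
  simp only [List.nil_append] at h
  rw [← h]
  apply PySem.List.foldl_congr_mem
  intro ps k _
  simp only [fmtPart]
  split <;> rfl

-- count + length of the ≠-filter recovers the list length
theorem count_filter_len (a : String) (tl : List String) :
    tl.count a + (tl.filter (fun t => t ≠ a)).length = tl.length := by
  have h2 : (tl.filter (fun t => t ≠ a)) = tl.filter (fun t => !(t == a)) := by
    apply List.filter_congr; intro y _; by_cases h : y = a <;> simp [h]
  rw [h2]
  have h := List.length_eq_countP_add_countP (p := fun t : String => t == a) (l := tl)
  have h3 : (tl.filter (fun t => !(t == a))).length = tl.countP (fun t => !(t == a)) := by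
    rw [List.countP_eq_length_filter]
  have h4 : tl.count a = tl.countP (fun t => t == a) := by
    simp [List.count]
  simp at h
  have h5 : tl.countP (fun t => !(t == a)) = tl.countP (fun t => !decide (t = a)) := by
    apply List.countP_congr; intro y _; by_cases hy : y = a <;> simp [hy]
  omega

-- first-occurrence dedup commutes with filtering
theorem ofList_filter (p : String → Bool) (tl : List String) :
    PySem.Set.ofList (tl.filter p) = (PySem.Set.ofList tl).filter p := by
  induction tl with
  | nil => rfl
  | cons x tl ih =>
    by_cases hp : p x = true
    · rw [List.filter_cons_of_pos hp, PySem.Set.ofList_cons, PySem.Set.ofList_cons, ih]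
      rw [List.filter_cons_of_pos hp]
      simp only [PySem.Set.discard, List.filter_filter]
      congr 1
      apply List.filter_congr
      intro y _; rw [Bool.and_comm]
    · rw [List.filter_cons_of_neg hp, PySem.Set.ofList_cons, ih]
      rw [List.filter_cons_of_neg hp]
      simp only [PySem.Set.discard, List.filter_filter]
      apply List.filter_congr
      intro y hy
      by_cases hyx : y = x
      · subst hyx; simp [hp]
      · simp [hyx]

-- first-occurrence dedup peels off the head and the filtered tail
theorem ofList_cons_filter (a : String) (tl : List String) :
    PySem.Set.ofList (a :: tl) = a :: PySem.Set.ofList (tl.filter (fun t => t ≠ a)) := by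
  rw [PySem.Set.ofList_cons, ofList_filter]
  congr 1
  simp only [PySem.Set.discard]
  apply List.filter_congr
  intro y _; by_cases h : y = a <;> simp [h]

-- B's worklist loop emits fmtPart over the first-occurrence-ordered labels
theorem altParts_eq : ∀ (n : Nat) (targets : List String), targets.length ≤ n →
    altParts targets = (PySem.Set.ofList targets).map (fmtPart targets) := by
  intro n
  induction n with
  | zero =>
    intro targets hn
    rw [List.length_eq_zero_iff.mp (Nat.le_zero.mp hn)]
    simp [altParts]
  | succ n ih =>
    intro targets hn
    match targets with
    | [] => simp [altParts]
    | a :: tl =>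
      have hcount : ((a :: tl).length : Int) - ((tl.filter (fun t => t ≠ a)).length : Int)
          = ((a :: tl).count a : Int) := by
        have h1 := count_filter_len a tl
        have h3 : (a :: tl).count a = tl.count a + 1 := List.count_cons_self
        simp only [List.length_cons, h3]
        push_cast
        omega
      have hpart : (if ((((a :: tl).length : Int) - ((tl.filter (fun t => t ≠ a)).length : Int)) == 1)
              then a
              else a ++ " (" ++ PySem.Int.toStr (((a :: tl).length : Int) - ((tl.filter (fun t => t ≠ a)).length : Int)) ++ ")")
            = fmtPart (a :: tl) a := by
        rw [hcount]; rfl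
      have hfmtcongr : ∀ k ∈ PySem.Set.ofList (tl.filter (fun t => t ≠ a)),
          fmtPart (tl.filter (fun t => t ≠ a)) k = fmtPart (a :: tl) k := by
        intro k hk
        rw [PySem.Set.mem_ofList] at hk
        have hkne : k ≠ a := by simpa using (List.mem_filter.mp hk).2
        have hc : (tl.filter (fun t => t ≠ a)).count k = (a :: tl).count k := by
          rw [List.count_filter (by simpa using hkne)]
          rw [List.count_cons]
          simp only [beq_iff_eq]
          rw [if_neg (fun hh => hkne hh.symm)]
          omega
        unfold fmtPart
        rw [hc]
      have hlen : (tl.filter (fun t => t ≠ a)).length ≤ n := by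
        have h1 := List.length_filter_le (fun t => decide (t ≠ a)) tl
        have hn' : tl.length ≤ n := by simpa using Nat.le_of_succ_le_succ hn
        omega
      rw [ofList_cons_filter, List.map_cons, ← hpart, ← List.map_congr_left hfmtcongr,
        ← ih (tl.filter (fun t => t ≠ a)) hlen]
      simp only [altParts]

-- ===== VERDICT (by name: the statement is the Claim_ definition above) =====
theorem summarize_targets_py_spec : Claim_equal_summarize_targets_py := by
  intro targets _
  unfold Spec_summarize_targets_py summarize_targets_py summarize_targets_py_alt
  by_cases h : targets = []
  · subst h
    rw [if_pos rfl]
    apply String.toList_inj.mp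
    rw [PySem.Str.toList_join]
    simp [altParts, PySem.Chars.join_nil]
  · rw [if_neg h]
    exact congrArg (PySem.Str.join ", ")
      ((partsA_eq targets).trans (altParts_eq targets.length targets le_rfl).symm)
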